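-- pv_equiv track=rewrite | github.com/tinechelovec/Funpay-Telegram-Gifts | Funpay-Telegram-Gifts/funpay_gift_bot.py | expand_assignment
-- ===== SOURCE A (Python) =====
-- from typing import Optional, Tuple, List, Any, Dict
--
-- def expand_assignment(recipients: List[str], qty: int) -> List[str]:
--     if not recipients:
--         return []
--     if len(recipients) == 1:
--         return [recipients[0]] * qty
--     out: List[str] = []
--     i = 0
--     for _ in range(qty):
--         out.append(recipients[i % len(recipients)])
--         i += 1
--     return out
-- ===== SOURCE B (Python) =====
-- def expand_assignment(recipients, qty):
--     if not recipients or qty <= 0: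
--         return []
--     n = len(recipients)
--     reps = -(-qty // n)  # ceiling division
--     return (recipients * reps)[:qty]
-- ===== Notes on version B (the rewrite author's own statement) =====
-- stated objective: idiomatic
-- what changed: Replaces the per-element modulo-index loop (and the len==1 special case) with a single list repetition by ceil(qty/n) followed by one slice [:qty].
import Mathlib
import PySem

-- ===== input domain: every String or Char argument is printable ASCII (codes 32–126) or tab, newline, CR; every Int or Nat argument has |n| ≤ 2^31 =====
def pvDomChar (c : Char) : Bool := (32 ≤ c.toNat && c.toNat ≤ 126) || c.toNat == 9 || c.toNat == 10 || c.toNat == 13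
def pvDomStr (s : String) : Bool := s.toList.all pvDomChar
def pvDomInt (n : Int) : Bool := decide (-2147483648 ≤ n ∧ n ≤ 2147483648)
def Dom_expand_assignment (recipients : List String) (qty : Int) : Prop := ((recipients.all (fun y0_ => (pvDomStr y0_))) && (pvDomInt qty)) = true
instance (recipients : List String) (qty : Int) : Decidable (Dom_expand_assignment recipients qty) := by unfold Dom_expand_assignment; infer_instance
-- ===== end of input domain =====

-- B builds the cycled list by repeating the whole list ceil(qty/n) times and slicing to qty,
-- instead of A's per-element modulo-index loop; objective: idiomatic. Equivalence is exact.

-- ===== PORT A =====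
def expand_assignment (recipients : List String) (qty : Int) : List String :=
  if recipients = [] then []
  else if recipients.length = 1 then
    -- [recipients[0]] * qty  (Python list repetition: empty for qty ≤ 0)
    List.replicate qty.toNat (PySem.List.pyGetD recipients 0 "")
  else
    -- out = []; i = 0; for _ in range(qty): out.append(recipients[i % len]); i += 1
    (((PySem.List.pyRange 0 qty 1).foldl
        (fun (acc : List String × Int) _ =>
          (acc.1 ++ [PySem.List.pyGetD recipients
                      (PySem.Int.mod acc.2 (recipients.length : Int)) ""],
           acc.2 + 1))
        ([], 0)).1)

-- ===== PORT B =====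
def expand_assignment_alt (recipients : List String) (qty : Int) : List String :=
  if recipients = [] ∨ qty ≤ 0 then []
  else
    -- n = len(recipients); reps = -(-qty // n); (recipients * reps)[:qty]
    PySem.List.slice
      (List.flatten (List.replicate (-(PySem.Int.floordiv (-qty) (recipients.length : Int))).toNat recipients))
      none (some qty)

-- ===== PRECONDITION & SPEC =====
def Spec_expand_assignment (recipients : List String) (qty : Int) (out : List String) : Prop := out = expand_assignment_alt recipients qty
instance (recipients : List String) (qty : Int) (out : List String) : Decidable (Spec_expand_assignment recipients qty out) := by unfold Spec_expand_assignment; infer_instance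

-- ===== CLAIM (what is proved, stated in full; the proofs are below) =====
def Claim_equal_expand_assignment : Prop := ∀ (recipients : List String) (qty : Int), Dom_expand_assignment recipients qty → Spec_expand_assignment recipients qty (expand_assignment recipients qty)

-- ===== LEMMAS AND PROOFS =====

-- the common value both sides compute: element k is xs[k % n]
def pvCyc (xs : List String) (q : Nat) : List String :=
  (List.range q).map (fun k => xs.getD (k % xs.length) "")

-- first q ≤ n elements of the cycle are just a prefix of xs
theorem pvTake_eq_cyc (xs : List String) (q : Nat) (hq : q ≤ xs.length) :
    xs.take q = pvCyc xs q := by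
  apply List.ext_getElem
  · simp [pvCyc, Nat.min_eq_left hq]
  · intro k h1 h2
    have hk : k < q := by simpa [pvCyc] using h2
    have hkn : k < xs.length := lt_of_lt_of_le hk hq
    simp [pvCyc, Nat.mod_eq_of_lt hkn, List.getD_eq_getElem?_getD,
      List.getElem?_eq_getElem hkn]

theorem pvCons_cyc (xs : List String) (q : Nat) (hn : xs.length ≤ q) :
    xs ++ pvCyc xs (q - xs.length) = pvCyc xs q := by
  by_cases hnil : xs = []
  · simp [hnil]
  · have h : xs.length ≠ 0 := by simpa [List.length_eq_zero_iff] using hnil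
    apply List.ext_getElem
    · simp [pvCyc]; omega
    · intro k h1 h2
      have hk : k < q := by simpa [pvCyc] using h2
      by_cases hlt : k < xs.length
      · simp [pvCyc, hlt, Nat.mod_eq_of_lt hlt, List.getD_eq_getElem?_getD]
      · replace hlt : xs.length ≤ k := le_of_not_gt hlt
        have h3 : k - xs.length < q - xs.length := by omega
        have hmod : (k - xs.length) % xs.length = k % xs.length := by
          conv_rhs => rw [show k = (k - xs.length) + xs.length by omega]
          simp [Nat.add_mod_right]
        simp [pvCyc, List.getElem_append, not_lt.mpr hlt, hmod]

-- B side: a prefix of the flattened repetition is the cycle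
theorem pvFlatten_take (xs : List String) (r q : Nat)
    (h : q ≤ r * xs.length) :
    (List.flatten (List.replicate r xs)).take q = pvCyc xs q := by
  induction r generalizing q with
  | zero =>
    have : q = 0 := by omega
    simp [this, pvCyc]
  | succ r ih =>
    rw [List.replicate_succ, List.flatten_cons, List.take_append]
    by_cases hq : q ≤ xs.length
    · have : q - xs.length = 0 := by omega
      rw [this]
      simpa using pvTake_eq_cyc xs q hq
    · replace hq : xs.length < q := lt_of_not_ge hq
      have htk : xs.take q = xs := List.take_of_length_le (le_of_lt hq)
      have hih : q - xs.length ≤ r * xs.length := by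
        have hexp : (r + 1) * xs.length = r * xs.length + xs.length := Nat.succ_mul r xs.length
        omega
      rw [htk, ih _ hih]
      exact pvCons_cyc xs q (le_of_lt hq)

-- A side: the fold accumulates the cycle, one element per step
theorem pvFold_cyc (xs : List String) (l : List Int)
    (out : List String) (i : Nat) :
    ((l.foldl
        (fun (acc : List String × Int) _ =>
          (acc.1 ++ [PySem.List.pyGetD xs
                      (PySem.Int.mod acc.2 (xs.length : Int)) ""],
           acc.2 + 1))
        (out, (i : Int))).1)
      = out ++ (List.range l.length).map (fun k => xs.getD ((i + k) % xs.length) "") := by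
  induction l generalizing out i with
  | nil => simp
  | cons a t ih =>
    have hstep : PySem.List.pyGetD xs (PySem.Int.mod (i : Int) (xs.length : Int)) ""
        = xs.getD (i % xs.length) "" := by
      rw [PySem.Int.mod_natCast, PySem.List.pyGetD_natCast]
    have hcast : ((i : Int) + 1) = ((i + 1 : Nat) : Int) := by push_cast; ring
    simp only [List.foldl_cons, hstep, hcast]
    rw [ih, List.length_cons, List.range_succ_eq_map]
    simp only [List.map_cons, List.map_map, Function.comp_def, List.append_assoc,
      List.singleton_append, Nat.add_zero]
    congr 2
    apply List.map_congr_left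
    intro k _
    congr 2
    omega

theorem pvA_eq_cyc (xs : List String) (qty : Int) (hxs : xs ≠ []) :
    expand_assignment xs qty = pvCyc xs qty.toNat := by
  unfold expand_assignment
  rw [if_neg hxs]
  by_cases h1 : xs.length = 1
  · rw [if_pos h1]
    apply List.ext_getElem
    · simp [pvCyc]
    · intro k hk1 hk2
      have hk : k < qty.toNat := by simpa using hk1
      have h0 : k % xs.length = 0 := by rw [h1]; omega
      simp [pvCyc, h0, PySem.List.pyGetD_zero, List.getD]
  · rw [if_neg h1]
    have := pvFold_cyc xs (PySem.List.pyRange 0 qty 1) [] 0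
    simp only [Nat.cast_zero] at this
    rw [this]
    simp [pvCyc, PySem.List.length_pyRange_one]

theorem pvB_eq_cyc (xs : List String) (qty : Int) (hxs : xs ≠ []) (hq : 0 < qty) :
    expand_assignment_alt xs qty = pvCyc xs qty.toNat := by
  unfold expand_assignment_alt
  rw [if_neg (by rintro (h | h); exact hxs h; omega)]
  have hn : (0 : Int) < (xs.length : Int) := by
    have : xs.length ≠ 0 := by simpa [List.length_eq_zero_iff] using hxs
    omega
  rw [PySem.List.slice_to _ (by omega)]
  set n : Int := (xs.length : Int)
  set d : Int := PySem.Int.floordiv (-qty) n with hd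
  have hdecomp := PySem.Int.floordiv_mul_add_mod (-qty) n
  have hm0 : 0 ≤ PySem.Int.mod (-qty) n := PySem.Int.mod_nonneg _ hn
  have hge : qty ≤ (-d) * n := by rw [hd]; nlinarith [hdecomp]
  have hdn : (0:Int) ≤ -d := by nlinarith [hge, hn, hq]
  apply pvFlatten_take
  have : ((-d).toNat : Int) * n = (-d) * n := by rw [Int.toNat_of_nonneg hdn]
  have hq2 : (qty.toNat : Int) = qty := Int.toNat_of_nonneg (by omega)
  have : (qty.toNat : Int) ≤ ((-d).toNat : Int) * ((xs.length : Nat) : Int) := by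
    rw [hq2, this]; exact hge
  exact_mod_cast this

-- ===== VERDICT (by name: the statement is the Claim_ definition above) =====
theorem expand_assignment_spec : Claim_equal_expand_assignment := by
  intro recipients qty _
  unfold Spec_expand_assignment
  by_cases hxs : recipients = []
  · subst hxs
    simp [expand_assignment, expand_assignment_alt]
  · by_cases hq : qty ≤ 0
    · have hA : expand_assignment recipients qty = [] := by
        rw [pvA_eq_cyc recipients qty hxs]
        have : qty.toNat = 0 := by omega
        simp [this, pvCyc]
      have hB : expand_assignment_alt recipients qty = [] := by
        unfold expand_assignment_alt
        rw [if_pos (Or.inr hq)]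
      rw [hA, hB]
    · replace hq : 0 < qty := lt_of_not_ge hq
      rw [pvA_eq_cyc recipients qty hxs, pvB_eq_cyc recipients qty hxs hq]
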